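-- pv_equiv track=rewrite | github.com/IvanParedesA/hopfield | hopfield.py | capacidad_teorica
-- ===== SOURCE A (Python) =====
-- def capacidad_teorica(N):
--     # Aproximación de log2(N) sin librerías: contar divisiones por 2
--     x = N
--     pasos = 0
--     while x > 1:
--         x //= 2
--         pasos += 1
--     p1 = int(0.15 * N)
--     p2 = int(N / (2 * pasos)) if pasos > 0 else 0
--     return p1, p2
-- ===== SOURCE B (Python) =====
-- def capacidad_teorica(N):
--     # floor(log2 N) via bit_length instead of the halving loop
--     pasos = N.bit_length() - 1 if N > 1 else 0
--     p1 = int(0.15 * N)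
--     p2 = int(N / (2 * pasos)) if pasos > 0 else 0
--     return p1, p2
-- ===== Notes on version B (the rewrite author's own statement) =====
-- stated objective: simpler
-- what changed: The halving loop that counts floor(log2 N) is replaced by a single closed-form bit_length() call; p1 and p2 are computed as in A.
import Mathlib
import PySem

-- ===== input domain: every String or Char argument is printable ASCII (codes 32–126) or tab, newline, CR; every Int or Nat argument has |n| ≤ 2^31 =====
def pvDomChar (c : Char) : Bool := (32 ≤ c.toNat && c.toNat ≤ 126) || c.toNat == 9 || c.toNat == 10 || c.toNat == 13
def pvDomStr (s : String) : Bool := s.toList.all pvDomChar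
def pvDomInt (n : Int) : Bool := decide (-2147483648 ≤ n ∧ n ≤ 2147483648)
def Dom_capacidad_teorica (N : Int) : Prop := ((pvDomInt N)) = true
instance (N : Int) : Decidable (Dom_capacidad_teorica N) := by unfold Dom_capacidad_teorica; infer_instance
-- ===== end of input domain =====

-- B replaces A's halving loop for floor(log2 N) by one closed-form bit_length() call (simpler).
-- Both ports render Python's float expressions by their exact integer values on |N| ≤ 2^31:
-- int(0.15 * N) = truncdiv (3*N) 20 (the double rounding of 0.15*N never crosses an integer there)
-- and int(N / (2*pasos)) = truncdiv N (2*pasos) (exact for |a|,|b| < 2^53).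

-- ===== PORT A =====
-- while x > 1: x //= 2; pasos += 1
def capLoop (x pasos : Int) : Int :=
  if h : 1 < x then capLoop (PySem.Int.floordiv x 2) (pasos + 1) else pasos
termination_by x.toNat
decreasing_by
  rw [PySem.Int.floordiv_eq_ediv_of_pos (by omega)]
  omega

def capacidad_teorica (N : Int) : Int × Int :=
  let pasos := capLoop N 0
  let p1 := PySem.Int.truncdiv (3 * N) 20          -- int(0.15 * N), exact on |N| ≤ 2^31
  let p2 := if 0 < pasos then PySem.Int.truncdiv N (2 * pasos) else 0  -- int(N / (2*pasos))
  (p1, p2)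

-- ===== PORT B =====
def capacidad_teorica_alt (N : Int) : Int × Int :=
  let pasos : Int := if 1 < N then (PySem.Int.bitLength N : Int) - 1 else 0
  let p1 := PySem.Int.truncdiv (3 * N) 20          -- int(0.15 * N), exact on |N| ≤ 2^31
  let p2 := if 0 < pasos then PySem.Int.truncdiv N (2 * pasos) else 0  -- int(N / (2*pasos))
  (p1, p2)

-- ===== PRECONDITION & SPEC =====
def Spec_capacidad_teorica (N : Int) (out : Int × Int) : Prop := out = capacidad_teorica_alt N
instance (N : Int) (out : Int × Int) : Decidable (Spec_capacidad_teorica N out) := by unfold Spec_capacidad_teorica; infer_instance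

-- ===== CLAIM (what is proved, stated in full; the proofs are below) =====
def Claim_equal_capacidad_teorica : Prop := ∀ (N : Int), Dom_capacidad_teorica N → Spec_capacidad_teorica N (capacidad_teorica N)

-- ===== LEMMAS AND PROOFS =====

-- A's loop computes pasos + (bit_length x - 1) for x > 1.
theorem capLoop_eq (n : Nat) : ∀ (x pasos : Int), x.toNat ≤ n → 1 < x →
    capLoop x pasos = pasos + ((PySem.Int.bitLength x : Nat) : Int) - 1 := by
  induction n with
  | zero => intro x pasos hle hx; omega
  | succ n ih =>
    intro x pasos hle hx
    rw [capLoop]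
    simp only [hx, dif_pos]
    have hfd : PySem.Int.floordiv x 2 = x / 2 := PySem.Int.floordiv_eq_ediv_of_pos (by omega)
    have hbl : PySem.Int.bitLength x = PySem.Int.bitLength (PySem.Int.floordiv x 2) + 1 :=
      PySem.Int.bitLength_of_pos (by omega)
    by_cases h2 : 1 < PySem.Int.floordiv x 2
    · rw [ih _ _ (by rw [hfd]; omega) h2]
      omega
    · have h1 : PySem.Int.floordiv x 2 = 1 := by rw [hfd] at h2 ⊢; omega
      rw [capLoop]
      simp only [h2, dif_neg, not_false_iff]
      rw [h1] at hbl
      have : PySem.Int.bitLength 1 = 1 := by decide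
      omega

theorem pasos_eq (N : Int) :
    capLoop N 0 = (if 1 < N then (PySem.Int.bitLength N : Int) - 1 else 0) := by
  by_cases h : 1 < N
  · rw [capLoop_eq N.toNat N 0 le_rfl h]
    simp [h]
  · rw [capLoop]
    simp [h]

-- ===== VERDICT (by name: the statement is the Claim_ definition above) =====
theorem capacidad_teorica_spec : Claim_equal_capacidad_teorica := by
  intro N _
  unfold Spec_capacidad_teorica capacidad_teorica capacidad_teorica_alt
  rw [pasos_eq]
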